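-- pv_equiv track=rewrite | github.com/corinaminer/mm-hint-bot | utils.py | get_owl_aliases
-- ===== SOURCE A (Python) =====
-- def get_owl_aliases(owl_location):
--     # Since check and item names for owl statues are so similar, ensure that we have all the same aliases
--     # for a given owl statue's check and item. This way any hint request like "!hint ct owl" will tell the
--     # user to disambiguate with !hint-item or !hint-check.
--     suffixes = [" owl", " owl statue"]
--     aliases = {owl_location + suffix for suffix in suffixes}
--     aliases.add(f"owl statue {owl_location}")
--     if owl_location == "clock town":
--         aliases.update(["clocktown" + suffix for suffix in suffixes])
--         aliases.update(["ct" + suffix for suffix in suffixes])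
--     elif owl_location == "southern swamp":
--         aliases.update(["swamp" + suffix for suffix in suffixes])
--     elif owl_location == "mountain village":
--         aliases.update(["mv" + suffix for suffix in suffixes])
--     elif owl_location == "great bay coast" or owl_location == "great bay":
--         # This is the only case where check and item disagree on location name:
--         # check is Great Bay Coast Owl Statue, item is Owl Statue (Great Bay)
--         other_loc = "great bay coast" if owl_location == "great bay" else "great bay"
--         aliases.update([other_loc + suffix for suffix in suffixes])
--         aliases.add(f"owl statue {other_loc}")
--         aliases.update(["gbc" + suffix for suffix in suffixes])
--     return aliases
-- ===== SOURCE B (Python) =====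
-- # The five owl locations with extra aliases have their complete answer sets
-- # precomputed once; every other location gets only the three generic forms.
-- _SPECIAL_ALIASES = {
--     "clock town": [
--         "clock town owl", "clock town owl statue", "owl statue clock town",
--         "clocktown owl", "clocktown owl statue", "ct owl", "ct owl statue",
--     ],
--     "southern swamp": [
--         "southern swamp owl", "southern swamp owl statue",
--         "owl statue southern swamp", "swamp owl", "swamp owl statue",
--     ],
--     "mountain village": [
--         "mountain village owl", "mountain village owl statue",
--         "owl statue mountain village", "mv owl", "mv owl statue",
--     ],
--     "great bay": [
--         "great bay owl", "great bay owl statue", "owl statue great bay",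
--         "great bay coast owl", "great bay coast owl statue",
--         "owl statue great bay coast", "gbc owl", "gbc owl statue",
--     ],
--     "great bay coast": [
--         "great bay coast owl", "great bay coast owl statue",
--         "owl statue great bay coast", "great bay owl", "great bay owl statue",
--         "owl statue great bay", "gbc owl", "gbc owl statue",
--     ],
-- }
--
--
-- def get_owl_aliases(owl_location):
--     special = _SPECIAL_ALIASES.get(owl_location)
--     if special is not None:
--         return set(special)
--     return {owl_location + " owl", owl_location + " owl statue",
--             "owl statue " + owl_location}
-- ===== Notes on version B (the rewrite author's own statement) =====
-- stated objective: simpler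
-- what changed: B does no per-call alias construction for the special locations at all: their complete answer sets are materialized as literal data, and the function is a single table lookup falling back to the three generic forms, instead of A's suffix-comprehension loops plus an if/elif chain of incremental set updates.
import Mathlib
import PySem

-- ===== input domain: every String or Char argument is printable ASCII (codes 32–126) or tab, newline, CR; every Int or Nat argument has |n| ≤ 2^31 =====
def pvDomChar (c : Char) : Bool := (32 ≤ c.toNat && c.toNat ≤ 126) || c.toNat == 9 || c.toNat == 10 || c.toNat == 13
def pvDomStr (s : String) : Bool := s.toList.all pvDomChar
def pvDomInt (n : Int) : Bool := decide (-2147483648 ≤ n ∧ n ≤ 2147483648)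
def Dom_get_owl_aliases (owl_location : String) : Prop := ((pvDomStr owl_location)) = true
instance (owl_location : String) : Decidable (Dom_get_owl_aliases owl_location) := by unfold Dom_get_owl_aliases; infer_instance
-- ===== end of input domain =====

-- B precomputes the complete answer sets of the five special locations as literal data:
-- the function is a single table lookup, falling back to the three generic alias forms
-- (objective: simpler; same constant cost).

-- ===== PORT A =====
def get_owl_aliases (owl_location : String) : List String :=
  let suffixes : List String := [" owl", " owl statue"]
  let aliases : PySem.Set String :=
    PySem.Set.ofList (suffixes.map (fun suffix => owl_location ++ suffix))
  let aliases := PySem.Set.add aliases ("owl statue " ++ owl_location)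
  if owl_location == "clock town" then
    let aliases := PySem.Set.update aliases (suffixes.map (fun s => "clocktown" ++ s))
    PySem.Set.update aliases (suffixes.map (fun s => "ct" ++ s))
  else if owl_location == "southern swamp" then
    PySem.Set.update aliases (suffixes.map (fun s => "swamp" ++ s))
  else if owl_location == "mountain village" then
    PySem.Set.update aliases (suffixes.map (fun s => "mv" ++ s))
  else if owl_location == "great bay coast" || owl_location == "great bay" then
    let other_loc : String :=
      if owl_location == "great bay" then "great bay coast" else "great bay"
    let aliases := PySem.Set.update aliases (suffixes.map (fun s => other_loc ++ s))
    let aliases := PySem.Set.add aliases ("owl statue " ++ other_loc)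
    PySem.Set.update aliases (suffixes.map (fun s => "gbc" ++ s))
  else
    aliases

-- ===== PORT B =====
def pvSpecialAliases : PySem.Dict String (List String) :=
  PySem.Dict.ofList
    [("clock town",
      ["clock town owl", "clock town owl statue", "owl statue clock town",
       "clocktown owl", "clocktown owl statue", "ct owl", "ct owl statue"]),
     ("southern swamp",
      ["southern swamp owl", "southern swamp owl statue",
       "owl statue southern swamp", "swamp owl", "swamp owl statue"]),
     ("mountain village",
      ["mountain village owl", "mountain village owl statue",
       "owl statue mountain village", "mv owl", "mv owl statue"]),
     ("great bay",
      ["great bay owl", "great bay owl statue", "owl statue great bay",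
       "great bay coast owl", "great bay coast owl statue",
       "owl statue great bay coast", "gbc owl", "gbc owl statue"]),
     ("great bay coast",
      ["great bay coast owl", "great bay coast owl statue",
       "owl statue great bay coast", "great bay owl", "great bay owl statue",
       "owl statue great bay", "gbc owl", "gbc owl statue"])]

def get_owl_aliases_alt (owl_location : String) : List String :=
  match pvSpecialAliases.get? owl_location with
  | some special => PySem.Set.ofList special
  | none =>
      PySem.Set.ofList
        [owl_location ++ " owl", owl_location ++ " owl statue",
         "owl statue " ++ owl_location]

-- ===== PRECONDITION & SPEC =====
def Spec_get_owl_aliases (owl_location : String) (out : List String) : Prop := out = get_owl_aliases_alt owl_location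
instance (owl_location : String) (out : List String) : Decidable (Spec_get_owl_aliases owl_location out) := by unfold Spec_get_owl_aliases; infer_instance

-- ===== CLAIM (what is proved, stated in full; the proofs are below) =====
def Claim_equal_get_owl_aliases : Prop := ∀ (owl_location : String), Dom_get_owl_aliases owl_location → Spec_get_owl_aliases owl_location (get_owl_aliases owl_location)

-- ===== LEMMAS AND PROOFS =====

-- ===== VERDICT (by name: the statement is the Claim_ definition above) =====
theorem get_owl_aliases_spec : Claim_equal_get_owl_aliases := by
  intro loc _
  unfold Spec_get_owl_aliases get_owl_aliases get_owl_aliases_alt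
  by_cases h1 : loc = "clock town"
  · subst h1; decide
  · by_cases h2 : loc = "southern swamp"
    · subst h2; decide
    · by_cases h3 : loc = "mountain village"
      · subst h3; decide
      · by_cases h4 : loc = "great bay coast"
        · subst h4; decide
        · by_cases h5 : loc = "great bay"
          · subst h5; decide
          · have hnone : pvSpecialAliases.get? loc = none := by
              have hmk : pvSpecialAliases = PySem.Dict.mk
                  [("clock town",
                    ["clock town owl", "clock town owl statue", "owl statue clock town",
                     "clocktown owl", "clocktown owl statue", "ct owl", "ct owl statue"]),
                   ("southern swamp",
                    ["southern swamp owl", "southern swamp owl statue",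
                     "owl statue southern swamp", "swamp owl", "swamp owl statue"]),
                   ("mountain village",
                    ["mountain village owl", "mountain village owl statue",
                     "owl statue mountain village", "mv owl", "mv owl statue"]),
                   ("great bay",
                    ["great bay owl", "great bay owl statue", "owl statue great bay",
                     "great bay coast owl", "great bay coast owl statue",
                     "owl statue great bay coast", "gbc owl", "gbc owl statue"]),
                   ("great bay coast",
                    ["great bay coast owl", "great bay coast owl statue",
                     "owl statue great bay coast", "great bay owl", "great bay owl statue",
                     "owl statue great bay", "gbc owl", "gbc owl statue"])] := by decide
              simp [hmk, Ne.symm h1, Ne.symm h2,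
                Ne.symm h3, Ne.symm h4, Ne.symm h5, PySem.Dict.get?]
            simp [h1, h2, h3, h4, h5, hnone, PySem.Set.ofList, List.foldl]
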